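-- pv_equiv track=rewrite | github.com/RobWKing/RetroFuture | spawns.py | calculate_total_enemies
-- ===== SOURCE A (Python) =====
-- def calculate_total_enemies(spawn_data):
--     total_enemies_per_level = {}
--     for level, level_data_list in spawn_data.items():
--         total_enemies = 0
--         for per_second_enemy_list in level_data_list:
--             for enemy_list in per_second_enemy_list.values():
--                 for individual_enemies in enemy_list:
--                     for enemy_count in individual_enemies.values():
--                         total_enemies += enemy_count
--         total_enemies_per_level[level] = total_enemies
--
--     return total_enemies_per_level
-- ===== SOURCE B (Python) =====
-- def calculate_total_enemies(spawn_data):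
--     def sum_leaves(x):
--         if isinstance(x, dict):
--             return sum(sum_leaves(v) for v in x.values())
--         if isinstance(x, (list, tuple)):
--             return sum(sum_leaves(v) for v in x)
--         return x
--     return {level: sum_leaves(level_data_list)
--             for level, level_data_list in spawn_data.items()}
-- ===== Notes on version B (the rewrite author's own statement) =====
-- stated objective: simpler
-- what changed: Replaces the four hand-written nested accumulator loops with a recursive sum_leaves walker plus a dict comprehension, summing each level's nested structure via map/sum instead of a mutable running total.
import Mathlib
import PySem

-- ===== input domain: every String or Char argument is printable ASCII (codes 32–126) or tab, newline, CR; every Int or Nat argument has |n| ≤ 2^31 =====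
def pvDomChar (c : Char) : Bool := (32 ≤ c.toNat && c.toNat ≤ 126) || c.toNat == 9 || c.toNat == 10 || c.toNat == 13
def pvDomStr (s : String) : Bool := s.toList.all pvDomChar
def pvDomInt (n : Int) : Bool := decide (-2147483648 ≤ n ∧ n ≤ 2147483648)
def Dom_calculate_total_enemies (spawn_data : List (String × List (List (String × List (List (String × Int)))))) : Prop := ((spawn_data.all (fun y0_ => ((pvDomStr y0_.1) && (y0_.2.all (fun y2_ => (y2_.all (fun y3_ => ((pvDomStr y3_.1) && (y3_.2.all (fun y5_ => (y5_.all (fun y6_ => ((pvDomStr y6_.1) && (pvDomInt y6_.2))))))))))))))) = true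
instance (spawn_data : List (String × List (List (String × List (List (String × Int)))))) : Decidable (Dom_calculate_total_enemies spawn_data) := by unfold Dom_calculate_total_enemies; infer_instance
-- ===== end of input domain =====

-- B replaces A's four nested accumulator loops with a recursive leaf-summing walker (map/sum per level); objective: simpler.


-- ===== PORT A =====
-- Four nested for-loops with a running total; result dict built by assignment (PySem.Dict.insert).
def calculate_total_enemies (spawn_data : List (String × List (List (String × List (List (String × Int)))))) : List (String × Int) :=
  (spawn_data.foldl
    (fun (acc : PySem.Dict String Int) p =>
      let total : Int := p.2.foldl
        (fun t per_second => per_second.foldl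
          (fun t q => q.2.foldl
            (fun t individual => individual.foldl
              (fun t r => t + r.2) t) t) t) 0
      acc.insert p.1 total)
    PySem.Dict.empty).items

-- ===== PORT B =====
-- sum_leaves specialised to each nesting level of the (fixed) input type: sum of values / items.
def pvSumEnemies (individual : List (String × Int)) : Int := (individual.map Prod.snd).sum
def pvSumEnemyList (el : List (List (String × Int))) : Int := (el.map pvSumEnemies).sum
def pvSumPerSecond (d : List (String × List (List (String × Int)))) : Int := (d.map (fun q => pvSumEnemyList q.2)).sum
def pvSumLevel (l : List (List (String × List (List (String × Int))))) : Int := (l.map pvSumPerSecond).sum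

def calculate_total_enemies_alt (spawn_data : List (String × List (List (String × List (List (String × Int)))))) : List (String × Int) :=
  (spawn_data.foldl
    (fun (acc : PySem.Dict String Int) p => acc.insert p.1 (pvSumLevel p.2))
    PySem.Dict.empty).items

-- ===== PRECONDITION & SPEC =====
def Spec_calculate_total_enemies (spawn_data : List (String × List (List (String × List (List (String × Int)))))) (out : List (String × Int)) : Prop := out = calculate_total_enemies_alt spawn_data
instance (spawn_data : List (String × List (List (String × List (List (String × Int)))))) (out : List (String × Int)) : Decidable (Spec_calculate_total_enemies spawn_data out) := by unfold Spec_calculate_total_enemies; infer_instance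

-- ===== CLAIM (what is proved, stated in full; the proofs are below) =====
def Claim_equal_calculate_total_enemies : Prop := ∀ (spawn_data : List (String × List (List (String × List (List (String × Int)))))), Dom_calculate_total_enemies spawn_data → Spec_calculate_total_enemies spawn_data (calculate_total_enemies spawn_data)

-- ===== LEMMAS AND PROOFS =====

theorem sum_individual (individual : List (String × Int)) (t : Int) :
    individual.foldl (fun t r => t + r.2) t = t + pvSumEnemies individual :=
  PySem.List.foldl_add (g := Prod.snd) individual t

theorem sum_enemy_list (el : List (List (String × Int))) (t : Int) :
    el.foldl (fun t individual => individual.foldl (fun t r => t + r.2) t) t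
      = t + pvSumEnemyList el := by
  simp only [sum_individual]
  exact PySem.List.foldl_add (g := pvSumEnemies) el t

theorem sum_per_second (d : List (String × List (List (String × Int)))) (t : Int) :
    d.foldl (fun t q => q.2.foldl (fun t individual => individual.foldl (fun t r => t + r.2) t) t) t
      = t + pvSumPerSecond d := by
  simp only [sum_enemy_list]
  exact PySem.List.foldl_add (g := fun q => pvSumEnemyList q.2) d t

theorem sum_level (l : List (List (String × List (List (String × Int))))) (t : Int) :
    l.foldl (fun t per_second => per_second.foldl (fun t q => q.2.foldl (fun t individual => individual.foldl (fun t r => t + r.2) t) t) t) t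
      = t + pvSumLevel l := by
  simp only [sum_per_second]
  exact PySem.List.foldl_add (g := pvSumPerSecond) l t

-- ===== VERDICT (by name: the statement is the Claim_ definition above) =====
theorem calculate_total_enemies_spec : Claim_equal_calculate_total_enemies := by
  intro spawn_data _
  unfold Spec_calculate_total_enemies calculate_total_enemies calculate_total_enemies_alt
  congr 2
  funext acc p
  simp [sum_level]
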